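-- pv_equiv track=rewrite | github.com/santule/indelmip | scripts/objective_scoring.py | sequence_obj_score
-- ===== SOURCE A (Python) =====
-- def sequence_obj_score(str1,str2):
--     objscore = 0
--     prev_dis = 0
--     curr_dis = 0
--
--     for i in range(0,len(str1)):
--         curr_dis  = int(str1[i]) - int(str2[i])
--
--         if curr_dis != 0 and curr_dis != prev_dis:
--             objscore += 2
--
--         objscore += abs(curr_dis)
--         prev_dis = curr_dis
--
--     return objscore
-- ===== SOURCE B (Python) =====
-- def sequence_obj_score(str1, str2):
--     # Run-length view: the score is, over maximal runs of equal digit-differences v,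
--     # (run length) * |v| plus a flat 2 for every run whose value is nonzero.
--     score = 0
--     i = 0
--     n = len(str1)
--     while i < n:
--         v = int(str1[i]) - int(str2[i])
--         j = i + 1
--         while j < n and int(str1[j]) - int(str2[j]) == v:
--             j += 1
--         score += (j - i) * abs(v) + (2 if v != 0 else 0)
--         i = j
--     return score
-- ===== Notes on version B (the rewrite author's own statement) =====
-- stated objective: alternative
-- what changed: A's single stateful character loop (tracking prev_dis) is replaced by a run-length decomposition: an outer loop walks maximal runs of equal digit-differences, an inner scan finds each run's end, and each run contributes length*|v| plus a flat 2 when its value v is nonzero.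
-- outside the precondition, e.g. on sequence_obj_score('12', '1'): A raises IndexError, B raises IndexError; on sequence_obj_score('a', 'b'): A raises ValueError, B raises ValueError
import Mathlib
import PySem

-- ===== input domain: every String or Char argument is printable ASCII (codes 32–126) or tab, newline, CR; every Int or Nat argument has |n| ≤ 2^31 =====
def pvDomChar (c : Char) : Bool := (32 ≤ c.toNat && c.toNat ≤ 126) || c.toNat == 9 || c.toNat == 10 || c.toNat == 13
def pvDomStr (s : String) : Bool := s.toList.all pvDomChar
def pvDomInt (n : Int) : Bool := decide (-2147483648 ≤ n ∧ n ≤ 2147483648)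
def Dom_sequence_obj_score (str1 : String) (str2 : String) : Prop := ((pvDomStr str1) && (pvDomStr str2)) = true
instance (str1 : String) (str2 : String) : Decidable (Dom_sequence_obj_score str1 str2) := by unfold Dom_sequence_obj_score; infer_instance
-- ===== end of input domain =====

-- B replaces A's single stateful character loop (prev_dis tracking) by a run-length
-- decomposition: walk maximal runs of equal digit-differences, each run of value v and
-- length L contributing L*|v| plus a flat 2 when v ≠ 0 (objective: alternative, same cost).

-- ===== PORT A =====
-- int(s[i]) for one character; 0 where Python would raise (those inputs are excluded by Pre_)
def pvCharInt (s : List Char) (i : Int) : Int :=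
  ((PySem.List.pyGet? s i).bind (fun c => PySem.Int.ofChars? [c])).getD 0

-- the digit difference int(str1[i]) - int(str2[i]), shared verbatim by both Pythons
def pvDiff (s1 s2 : List Char) (i : Int) : Int := pvCharInt s1 i - pvCharInt s2 i

-- one iteration of A's loop: state = (objscore, prev_dis), input = curr_dis
def pvStepA (st : Int × Int) (d : Int) : Int × Int :=
  ((if d ≠ 0 ∧ d ≠ st.2 then st.1 + 2 else st.1) + |d|, d)

def sequence_obj_score (str1 : String) (str2 : String) : Int :=
  ((PySem.List.pyRange 0 (PySem.Str.len str1) 1).foldl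
    (fun st i => pvStepA st (pvDiff str1.toList str2.toList i)) (0, 0)).1

-- ===== PORT B =====
-- B's inner while loop: advance j while j < n and the diff at j still equals v
def pvFindRun (s1 s2 : List Char) (n v j : Int) : Int :=
  if h : j < n ∧ pvDiff s1 s2 j = v then pvFindRun s1 s2 n v (j + 1) else j
  termination_by (n - j).toNat
  decreasing_by omega

-- needed by pvOuter's termination: the inner loop never moves j backwards
lemma pvFindRun_ge (s1 s2 : List Char) (n v : Int) : ∀ j, j ≤ pvFindRun s1 s2 n v j := by
  intro j
  rw [pvFindRun]
  split
  · have := pvFindRun_ge s1 s2 n v (j + 1)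
    omega
  · exact le_refl j
  termination_by j => (n - j).toNat
  decreasing_by omega

-- B's outer while loop over run starts
def pvOuter (s1 s2 : List Char) (n i score : Int) : Int :=
  if h : i < n then
    let v := pvDiff s1 s2 i
    let j := pvFindRun s1 s2 n v (i + 1)
    pvOuter s1 s2 n j (score + (j - i) * |v| + (if v ≠ 0 then 2 else 0))
  else score
  termination_by (n - i).toNat
  decreasing_by
    have := pvFindRun_ge s1 s2 n (pvDiff s1 s2 i) (i + 1)
    omega

def sequence_obj_score_alt (str1 : String) (str2 : String) : Int :=
  pvOuter str1.toList str2.toList (PySem.Str.len str1) 0 0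

-- ===== PRECONDITION & SPEC =====
-- Pre_ = exactly the inputs on which Python A returns: str2 at least as long as str1
-- (else IndexError) and every compared character a decimal digit (else ValueError from int()).
def Pre_sequence_obj_score (str1 : String) (str2 : String) : Prop :=
  str1.toList.length ≤ str2.toList.length ∧
  ((str1.toList ++ str2.toList.take str1.toList.length).all (fun c => c.isDigit)) = true
instance (str1 : String) (str2 : String) : Decidable (Pre_sequence_obj_score str1 str2) := by
  unfold Pre_sequence_obj_score; infer_instance

def pvWitness_sequence_obj_score : String × String := ("1402", "1503")

def Spec_sequence_obj_score (str1 : String) (str2 : String) (out : Int) : Prop := out = sequence_obj_score_alt str1 str2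
instance (str1 : String) (str2 : String) (out : Int) : Decidable (Spec_sequence_obj_score str1 str2 out) := by unfold Spec_sequence_obj_score; infer_instance

-- ===== CLAIM (what is proved, stated in full; the proofs are below) =====
def Claim_equal_sequence_obj_score : Prop := ∀ (str1 : String) (str2 : String), Dom_sequence_obj_score str1 str2 → Pre_sequence_obj_score str1 str2 → Spec_sequence_obj_score str1 str2 (sequence_obj_score str1 str2)

-- ===== LEMMAS AND PROOFS =====

-- the inner loop never passes n
lemma pvFindRun_le (s1 s2 : List Char) (n v : Int) : ∀ j, j ≤ n → pvFindRun s1 s2 n v j ≤ n := by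
  intro j hj
  rw [pvFindRun]
  split
  · exact pvFindRun_le s1 s2 n v (j + 1) (by omega)
  · exact hj
  termination_by j => (n - j).toNat
  decreasing_by omega

-- every index strictly inside the run has diff v
lemma pvFindRun_diff (s1 s2 : List Char) (n v : Int) :
    ∀ j k, j ≤ k → k < pvFindRun s1 s2 n v j → pvDiff s1 s2 k = v := by
  intro j k hjk hk
  rw [pvFindRun] at hk
  split at hk
  · rename_i h
    by_cases hkj : k = j
    · exact hkj ▸ h.2
    · exact pvFindRun_diff s1 s2 n v (j + 1) k (by omega) hk
  · omega
  termination_by j => (n - j).toNat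
  decreasing_by omega

-- at the run's end, if still inside the string, the diff differs from v
lemma pvFindRun_exit (s1 s2 : List Char) (n v : Int) :
    ∀ j, pvFindRun s1 s2 n v j < n → pvDiff s1 s2 (pvFindRun s1 s2 n v j) ≠ v := by
  intro j
  rw [pvFindRun]
  split
  · exact pvFindRun_exit s1 s2 n v (j + 1)
  · rename_i h
    intro hlt hdv
    exact h ⟨hlt, hdv⟩
  termination_by j => (n - j).toNat
  decreasing_by omega

-- A's loop over a block of constant diffs v, starting with prev_dis = v,
-- just accumulates |v| per index and keeps prev_dis = v
lemma pvRunFold (s1 s2 : List Char) (v : Int) :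
    ∀ (a b : Int), a ≤ b → (∀ k, a ≤ k → k < b → pvDiff s1 s2 k = v) → ∀ (x : Int),
    (PySem.List.pyRange a b 1).foldl (fun st k => pvStepA st (pvDiff s1 s2 k)) (x, v)
      = (x + (b - a) * |v|, v) := by
  intro a b hab hall x
  by_cases h : a < b
  · rw [PySem.List.pyRange_one_cons h, List.foldl_cons]
    have hd : pvDiff s1 s2 a = v := hall a le_rfl h
    have step : pvStepA (x, v) (pvDiff s1 s2 a) = (x + |v|, v) := by
      simp [pvStepA, hd]
    rw [step, pvRunFold s1 s2 v (a + 1) b (by omega) (fun k hk1 hk2 => hall k (by omega) hk2)]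
    have : x + |v| + (b - (a + 1)) * |v| = x + (b - a) * |v| := by ring
    rw [this]
  · have hba : b = a := le_antisymm (not_lt.1 h) hab
    subst hba
    rw [PySem.List.pyRange_one_eq_nil le_rfl]
    simp
  termination_by a b => (b - a).toNat
  decreasing_by omega

-- main invariant: A's remaining loop from index i with prev_dis = prev equals
-- B's remaining outer loop, provided prev cannot trigger a spurious run-continuation
lemma pvMain (s1 s2 : List Char) (n : Int) :
    ∀ (i acc prev : Int), (i < n → (pvDiff s1 s2 i ≠ prev ∨ pvDiff s1 s2 i = 0)) →
    ((PySem.List.pyRange i n 1).foldl (fun st k => pvStepA st (pvDiff s1 s2 k)) (acc, prev)).1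
      = pvOuter s1 s2 n i acc := by
  intro i acc prev hprev
  rw [pvOuter]
  by_cases hin : i < n
  · simp only [hin, dif_pos]
    have hge : i + 1 ≤ pvFindRun s1 s2 n (pvDiff s1 s2 i) (i + 1) :=
      pvFindRun_ge s1 s2 n (pvDiff s1 s2 i) (i + 1)
    have hle : pvFindRun s1 s2 n (pvDiff s1 s2 i) (i + 1) ≤ n :=
      pvFindRun_le s1 s2 n (pvDiff s1 s2 i) (i + 1) (by omega)
    rw [PySem.List.pyRange_one_append i (pvFindRun s1 s2 n (pvDiff s1 s2 i) (i + 1)) n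
      (by omega) hle, List.foldl_append,
      PySem.List.pyRange_one_cons (a := i) (by omega), List.foldl_cons]
    have hbonus : pvStepA (acc, prev) (pvDiff s1 s2 i)
        = (acc + (if pvDiff s1 s2 i ≠ 0 then 2 else 0) + |pvDiff s1 s2 i|, pvDiff s1 s2 i) := by
      rcases hprev hin with hne | hz
      · simp only [pvStepA]
        by_cases h0 : pvDiff s1 s2 i = 0 <;> simp [h0, hne]
      · simp [pvStepA, hz]
    rw [hbonus,
      pvRunFold s1 s2 (pvDiff s1 s2 i) (i + 1) (pvFindRun s1 s2 n (pvDiff s1 s2 i) (i + 1))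
        hge (fun k hk1 hk2 => pvFindRun_diff s1 s2 n (pvDiff s1 s2 i) (i + 1) k hk1 hk2)]
    have harith : acc + (if pvDiff s1 s2 i ≠ 0 then 2 else 0) + |pvDiff s1 s2 i|
          + (pvFindRun s1 s2 n (pvDiff s1 s2 i) (i + 1) - (i + 1)) * |pvDiff s1 s2 i|
        = acc + (pvFindRun s1 s2 n (pvDiff s1 s2 i) (i + 1) - i) * |pvDiff s1 s2 i|
          + (if pvDiff s1 s2 i ≠ 0 then 2 else 0) := by
      by_cases h0 : pvDiff s1 s2 i = 0
      · simp [h0]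
      · simp only [h0, ne_eq, not_false_iff, if_true]; ring
    rw [harith]
    exact pvMain s1 s2 n (pvFindRun s1 s2 n (pvDiff s1 s2 i) (i + 1)) _ (pvDiff s1 s2 i)
      (fun hlt => Or.inl (pvFindRun_exit s1 s2 n (pvDiff s1 s2 i) (i + 1) hlt))
  · simp only [hin, dif_neg, not_false_iff]
    rw [PySem.List.pyRange_one_eq_nil (by omega)]
    rfl
  termination_by i => (n - i).toNat
  decreasing_by
    have := pvFindRun_ge s1 s2 n (pvDiff s1 s2 i) (i + 1)
    omega

-- ===== VERDICT (by name: the statement is the Claim_ definition above) =====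
theorem sequence_obj_score_spec : Claim_equal_sequence_obj_score := by
  intro str1 str2 _ _
  simp only [Spec_sequence_obj_score, sequence_obj_score, sequence_obj_score_alt]
  exact pvMain str1.toList str2.toList (PySem.Str.len str1) 0 0 0
    (fun _ => by
      by_cases h : pvDiff str1.toList str2.toList 0 = 0
      · exact Or.inr h
      · exact Or.inl h)
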